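-- pv_equiv track=rewrite | github.com/budait/huawei-modbus-examples | dongle2-scan.py | regs2str
-- ===== SOURCE A (Python) =====
-- def regs2str(regs):
--     s = ""
--     for r in regs:
--         a = chr(r & 0xFF)
--         b = chr((r >> 8) & 0xFF)
--         if a == '\x00':
--             a = ' '
--         if b == '\x00':
--             b = ' '
--         s += "%c%c" % (b, a)
--     return s.rstrip()
-- ===== SOURCE B (Python) =====
-- def regs2str(regs):
--     # Scan the registers right-to-left, stripping trailing whitespace on the fly:
--     # nothing is appended until the first non-whitespace character (seen from the
--     # end), so no rstrip / second pass is needed; one final reverse restores order.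
--     out = []
--     for r in reversed(list(regs)):
--         for byte in (r & 0xFF, (r >> 8) & 0xFF):
--             ch = ' ' if byte == 0 else chr(byte)
--             if out or not ch.isspace():
--                 out.append(ch)
--     out.reverse()
--     return ''.join(out)
-- ===== Notes on version B (the rewrite author's own statement) =====
-- stated objective: alternative
-- what changed: B scans the registers right-to-left and strips trailing whitespace inline (nothing is emitted until the first non-whitespace character seen from the end), then reverses once, instead of A's left-to-right string concatenation with per-byte NUL branches followed by a separate rstrip pass.
import Mathlib
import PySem

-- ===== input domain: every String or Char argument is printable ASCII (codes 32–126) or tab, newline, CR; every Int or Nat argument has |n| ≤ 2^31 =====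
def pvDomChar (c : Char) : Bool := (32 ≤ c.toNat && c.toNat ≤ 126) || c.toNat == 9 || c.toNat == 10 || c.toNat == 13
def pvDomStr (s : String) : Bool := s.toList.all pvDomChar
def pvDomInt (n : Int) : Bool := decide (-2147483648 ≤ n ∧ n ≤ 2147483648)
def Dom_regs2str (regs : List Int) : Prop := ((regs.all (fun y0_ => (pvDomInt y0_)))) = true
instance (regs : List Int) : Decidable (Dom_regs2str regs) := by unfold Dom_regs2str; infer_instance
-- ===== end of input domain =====

-- B scans the registers right-to-left stripping trailing whitespace inline (no rstrip pass), then reverses once.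

-- ===== PORT A =====
-- Port of A. 'r & 0xFF' → PySem.Int.band, 'r >> 8' → Lean's '>>>' on Int (Python-exact per PySem);
-- the string is carried as List Char; '.rstrip()' → PySem.Chars.rstrip.
def regs2str (regs : List Int) : String :=
  let s : List Char := regs.foldl (fun s r =>
    let a := Char.ofNat (PySem.Int.band r 255).toNat
    let b := Char.ofNat (PySem.Int.band (r >>> 8) 255).toNat
    let a := if a = '\x00' then ' ' else a
    let b := if b = '\x00' then ' ' else b
    s ++ [b, a]) []
  String.mk (PySem.Chars.rstrip s)

-- ===== PORT B =====
-- Port of B: fold over reversed regs; per register the inner loop over (lo, hi) appends the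
-- (NUL→space) character only once something non-whitespace was seen; one final reverse.
def regs2str_alt (regs : List Int) : String :=
  let out : List Char := regs.reverse.foldl (fun (out : List Char) (r : Int) =>
    [(PySem.Int.band r 255).toNat, (PySem.Int.band (r >>> 8) 255).toNat].foldl
      (fun out byte =>
        let ch := if byte = 0 then ' ' else Char.ofNat byte
        if out ≠ [] ∨ PySem.Chars.isspace ch = false then out ++ [ch] else out) out) []
  String.mk out.reverse

-- ===== PRECONDITION & SPEC =====
def Spec_regs2str (regs : List Int) (out : String) : Prop := out = regs2str_alt regs
instance (regs : List Int) (out : String) : Decidable (Spec_regs2str regs out) := by unfold Spec_regs2str; infer_instance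

-- ===== CLAIM (what is proved, stated in full; the proofs are below) =====
def Claim_equal_regs2str : Prop := ∀ (regs : List Int), Dom_regs2str regs → Spec_regs2str regs (regs2str regs)

-- ===== LEMMAS AND PROOFS =====

-- B's per-character step.
def bStep (out : List Char) (ch : Char) : List Char :=
  if out ≠ [] ∨ PySem.Chars.isspace ch = false then out ++ [ch] else out

theorem bStep_ne_nil (acc : List Char) (h : acc ≠ []) (c : Char) : bStep acc c = acc ++ [c] := by
  simp [bStep, h]

theorem foldl_bStep_of_ne_nil (cs : List Char) (acc : List Char) (h : acc ≠ []) :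
    cs.foldl bStep acc = acc ++ cs := by
  induction cs generalizing acc with
  | nil => simp
  | cons c cs ih =>
    simp only [List.foldl_cons, bStep_ne_nil acc h c]
    rw [ih _ (by simp)]
    simp

-- B's scan from the empty accumulator drops exactly the leading whitespace of its input.
theorem foldl_bStep_nil (cs : List Char) :
    cs.foldl bStep [] = cs.dropWhile PySem.Chars.isspace := by
  induction cs with
  | nil => rfl
  | cons c cs ih =>
    by_cases hsp : PySem.Chars.isspace c = true
    · simp [bStep, hsp, List.dropWhile, ih]
    · simp only [List.foldl_cons, bStep, hsp]
      simp only [ne_eq, not_true_eq_false, false_or, if_pos] at *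
      rw [List.dropWhile]
      simp only [hsp, List.nil_append]
      exact foldl_bStep_of_ne_nil cs [c] (by simp)

theorem toNat_ofNat_byte (n : Nat) (h : n < 256) : (Char.ofNat n).toNat = n := by
  have hv : n.isValidChar := Or.inl (by omega)
  rw [Char.ofNat, dif_pos hv]
  simp [Char.toNat, Char.ofNatAux]

-- r & 255 always lands in [0, 256) (also for negative r: Python's infinite two's complement).
theorem band255_bounds (r : Int) : 0 ≤ PySem.Int.band r 255 ∧ PySem.Int.band r 255 < 256 := by
  unfold PySem.Int.band
  split_ifs with h1 h2
  · have : r.toNat &&& (255 : Int).toNat ≤ (255 : Int).toNat := Nat.and_le_right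
    constructor
    · positivity
    · omega
  · omega
  · have hle : (255 : Int).toNat - ((255 : Int).toNat &&& (-r - 1).toNat) ≤ 255 := by
      have : (255 : Int).toNat = 255 := rfl
      omega
    constructor
    · positivity
    · omega
  · omega

-- B's byte→char branch (numeric NUL test) equals A's (character NUL test), byte-bounded.
theorem chB_eq_chA (n : Nat) (h : n < 256) :
    (if n = 0 then ' ' else Char.ofNat n) =
      (if Char.ofNat n = '\x00' then ' ' else Char.ofNat n) := by
  by_cases h0 : n = 0
  · subst h0; simp
  · have hne : Char.ofNat n ≠ '\x00' := by
      intro hc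
      have := toNat_ofNat_byte n h
      rw [hc] at this
      exact h0 this.symm
    simp [h0, hne]

-- the characters a register contributes, in A's (left-to-right) order
def regChars (r : Int) : List Char :=
  [(if Char.ofNat (PySem.Int.band (r >>> 8) 255).toNat = '\x00' then ' '
    else Char.ofNat (PySem.Int.band (r >>> 8) 255).toNat),
   (if Char.ofNat (PySem.Int.band r 255).toNat = '\x00' then ' '
    else Char.ofNat (PySem.Int.band r 255).toNat)]

theorem regChars_lo_hi (r : Int) :
    [(if (PySem.Int.band r 255).toNat = 0 then ' ' else Char.ofNat (PySem.Int.band r 255).toNat),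
     (if (PySem.Int.band (r >>> 8) 255).toNat = 0 then ' '
      else Char.ofNat (PySem.Int.band (r >>> 8) 255).toNat)] = (regChars r).reverse := by
  have hlo := band255_bounds r
  have hhi := band255_bounds (r >>> 8)
  rw [chB_eq_chA (PySem.Int.band r 255).toNat (by omega),
      chB_eq_chA (PySem.Int.band (r >>> 8) 255).toNat (by omega)]
  simp [regChars]

-- A's loop builds exactly the concatenation of the per-register chunks.
theorem a_loop_eq_flatMap (regs : List Int) :
    regs.foldl (fun s r =>
      let a := Char.ofNat (PySem.Int.band r 255).toNat
      let b := Char.ofNat (PySem.Int.band (r >>> 8) 255).toNat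
      let a := if a = '\x00' then ' ' else a
      let b := if b = '\x00' then ' ' else b
      s ++ [b, a]) [] = regs.flatMap regChars := by
  rw [PySem.List.foldl_append_eq_flatMap]
  rfl

-- B's loop is the per-character scan over the reversed character stream.
theorem b_loop_eq_scan (regs : List Int) :
    regs.reverse.foldl (fun (out : List Char) (r : Int) =>
      [(PySem.Int.band r 255).toNat, (PySem.Int.band (r >>> 8) 255).toNat].foldl
        (fun out byte =>
          let ch := if byte = 0 then ' ' else Char.ofNat byte
          if out ≠ [] ∨ PySem.Chars.isspace ch = false then out ++ [ch] else out) out) [] =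
      ((regs.flatMap regChars).reverse).foldl bStep [] := by
  rw [List.reverse_flatMap, List.foldl_flatMap]
  apply PySem.List.foldl_congr_mem
  intro acc r _
  show _ = List.foldl bStep acc (regChars r).reverse
  rw [← regChars_lo_hi r]
  simp [bStep, List.foldl]

-- ===== VERDICT (by name: the statement is the Claim_ definition above) =====
theorem regs2str_spec : Claim_equal_regs2str := by
  intro regs _
  unfold Spec_regs2str regs2str regs2str_alt
  rw [a_loop_eq_flatMap, b_loop_eq_scan, foldl_bStep_nil]
  simp [PySem.Chars.rstrip]
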